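-- pv_equiv track=rewrite | github.com/DocAILab/Document-Fingerprints | tests/Winnowing2.py | winnowing
-- ===== SOURCE A (Python) =====
-- def winnowing(hashes, window_size):
--     """
--     使用Winnowing算法从哈希列表中生成文本的指纹。
--     :param hashes: 哈希值列表。
--     :param window_size: 滑动窗口大小。
--     :return: 文本的指纹。
--     """
--     min_hashes = []
--     # 找到初始窗口中的最小哈希值
--     min_hash = min(hashes[:window_size])
--     min_hashes.append(min_hash)
--
--     # 滑动窗口，选择局部最小哈希值
--     for i in range(1, len(hashes) - window_size + 1):
--         if hashes[i + window_size - 1] < min_hash: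
--             min_hash = hashes[i + window_size - 1]
--             min_hashes.append(min_hash)
--
--     return min_hashes
-- ===== SOURCE B (Python) =====
-- def winnowing(hashes, window_size):
--     # Materialize the full prefix-minimum table of [min(initial window)] + remaining
--     # hashes, then collapse runs of equal values in a second pass.
--     seq = [min(hashes[:window_size])] + hashes[window_size:]
--     prefix = []
--     cur = seq[0]
--     for h in seq:
--         cur = cur if cur < h else h
--         prefix.append(cur)
--     out = []
--     for v in prefix:
--         if not out or out[-1] != v:
--             out.append(v)
--     return out
-- ===== Notes on version B (the rewrite author's own statement) =====
-- stated objective: alternative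
-- what changed: B builds the driving sequence [min(initial window)] + remaining hashes, materializes its full prefix-minimum table in one pass, and collapses runs of equal values in a second pass, instead of conditionally appending new minima inside A's index-driven sliding scan.
-- outside the precondition, e.g. on winnowing([5, 3, 1, 9], -1): A returns [1], B returns [1]; on winnowing([], 2): A raises ValueError, B raises ValueError; on winnowing([4, 7], 0): A raises ValueError, B raises ValueError
import Mathlib
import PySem

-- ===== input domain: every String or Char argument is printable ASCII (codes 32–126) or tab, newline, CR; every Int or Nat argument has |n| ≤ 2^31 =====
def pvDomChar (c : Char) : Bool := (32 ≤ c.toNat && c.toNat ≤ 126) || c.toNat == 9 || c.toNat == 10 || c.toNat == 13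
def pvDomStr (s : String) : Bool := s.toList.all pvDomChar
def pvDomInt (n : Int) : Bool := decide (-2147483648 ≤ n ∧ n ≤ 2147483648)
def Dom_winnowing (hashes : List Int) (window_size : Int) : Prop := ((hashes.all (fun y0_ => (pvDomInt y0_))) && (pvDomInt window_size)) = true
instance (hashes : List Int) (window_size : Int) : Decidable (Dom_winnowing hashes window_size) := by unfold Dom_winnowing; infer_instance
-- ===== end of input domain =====

-- B materializes the full prefix-minimum table of [min(initial window)] + remaining hashes
-- and then collapses runs of equal values, instead of conditionally appending inside the scan (alternative decomposition, same cost).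


-- ===== PORT A =====
def winnowing (hashes : List Int) (window_size : Int) : List Int :=
  -- min_hash = min(hashes[:window_size])  -- ValueError on empty slice, excluded by Pre_
  match PySem.List.min? (PySem.List.slice hashes none (some window_size)) (fun y => y) with
  | none => []
  | some min_hash0 =>
    -- min_hashes = [min_hash]; for i in range(1, len(hashes) - window_size + 1): …
    ((PySem.List.pyRange 1 ((hashes.length : Int) - window_size + 1) 1).foldl
      (fun (st : Int × List Int) i =>
        match PySem.List.pyGet? hashes (i + window_size - 1) with
        | some h => if h < st.1 then (h, st.2 ++ [h]) else st
        | none => st)   -- IndexError: unreachable under Pre_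
      (min_hash0, [min_hash0])).2

-- ===== PORT B =====
def winnowing_alt (hashes : List Int) (window_size : Int) : List Int :=
  -- seq = [min(hashes[:window_size])] + hashes[window_size:]
  match PySem.List.min? (PySem.List.slice hashes none (some window_size)) (fun y => y) with
  | none => []
  | some m0 =>
    let seq := m0 :: PySem.List.slice hashes (some window_size) none
    -- prefix-minimum table: cur = seq[0]; for h in seq: cur = cur if cur < h else h; prefix.append(cur)
    let pref := (seq.foldl
      (fun (st : Int × List Int) h =>
        let cur := if st.1 < h then st.1 else h
        (cur, st.2 ++ [cur])) (m0, [])).2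
    -- collapse runs: for v in prefix: if not out or out[-1] != v: out.append(v)
    pref.foldl (fun out v => if out = [] ∨ out.getLast? ≠ some v then out ++ [v] else out) []

-- ===== PRECONDITION & SPEC =====
-- Pre_ restricts to the algorithm's natural domain: a positive window and a nonempty hash list.
-- It excludes inputs where hashes[:window_size] is empty (A raises ValueError: empty hashes, or
-- window_size = 0, or a too-negative window) and non-positive window sizes in general, where A's
-- value only arises through Python's negative-slice/negative-index wraparound.
def Pre_winnowing (hashes : List Int) (window_size : Int) : Prop :=
  1 ≤ window_size ∧ hashes ≠ []
instance (hashes : List Int) (window_size : Int) : Decidable (Pre_winnowing hashes window_size) := by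
  unfold Pre_winnowing; infer_instance

def pvWitness_winnowing : List Int × Int := ([3, 1, 2, 0, 5], 2)

def Spec_winnowing (hashes : List Int) (window_size : Int) (out : List Int) : Prop := out = winnowing_alt hashes window_size
instance (hashes : List Int) (window_size : Int) (out : List Int) : Decidable (Spec_winnowing hashes window_size out) := by unfold Spec_winnowing; infer_instance

-- ===== CLAIM (what is proved, stated in full; the proofs are below) =====
def Claim_equal_winnowing : Prop := ∀ (hashes : List Int) (window_size : Int), Dom_winnowing hashes window_size → Pre_winnowing hashes window_size → Spec_winnowing hashes window_size (winnowing hashes window_size)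

-- ===== LEMMAS AND PROOFS =====

-- A's record sequence: the strictly smaller values appended by A's scan, running min m.
def pvRecA (m : Int) : List Int → List Int
  | [] => []
  | h :: t => if h < m then h :: pvRecA h t else pvRecA m t

-- B's prefix-minimum table (running min c over the list).
def pvPm (c : Int) : List Int → List Int
  | [] => []
  | h :: t =>
    let c' := if c < h then c else h
    c' :: pvPm c' t

-- B's run collapse, given the last emitted value l.
def pvCl (l : Int) : List Int → List Int
  | [] => []
  | v :: r => if v = l then pvCl l r else v :: pvCl v r

-- A's indexed sliding fold equals a plain fold over the dropped suffix.
theorem pvFoldIdx {σ : Type} (hashes : List Int) (ws : Int) (f : σ → Int → σ)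
    (hws : 1 ≤ ws) :
    ∀ (u : List Int) (a : Int) (init : σ), 1 ≤ a →
    hashes.drop (a + ws - 1).toNat = u →
    (PySem.List.pyRange a ((hashes.length : Int) - ws + 1) 1).foldl
      (fun st i => match PySem.List.pyGet? hashes (i + ws - 1) with
                   | some h => f st h | none => st) init
    = u.foldl f init := by
  intro u
  induction u with
  | nil =>
    intro a init ha hdrop
    have hlen : hashes.length ≤ (a + ws - 1).toNat := by
      by_contra hlt
      push Not at hlt
      have := List.drop_eq_nil_iff.mp hdrop
      omega
    have hnil : PySem.List.pyRange a ((hashes.length : Int) - ws + 1) 1 = [] := by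
      apply PySem.List.pyRange_one_eq_nil
      omega
    simp [hnil]
  | cons h u' ih =>
    intro a init ha hdrop
    have hnn : 0 ≤ a + ws - 1 := by omega
    have hlt : (a + ws - 1).toNat < hashes.length := by
      by_contra hge
      push Not at hge
      rw [List.drop_eq_nil_iff.mpr hge] at hdrop
      exact List.cons_ne_nil _ _ hdrop.symm
    have hget : hashes[(a + ws - 1).toNat]? = some h := by
      have : (hashes.drop (a + ws - 1).toNat)[0]? = some h := by rw [hdrop]; rfl
      rw [List.getElem?_drop] at this
      simpa using this
    have hcons : PySem.List.pyRange a ((hashes.length : Int) - ws + 1) 1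
        = a :: PySem.List.pyRange (a + 1) ((hashes.length : Int) - ws + 1) 1 := by
      apply PySem.List.pyRange_one_cons
      omega
    rw [hcons]
    simp only [List.foldl_cons]
    have hpy : PySem.List.pyGet? hashes (a + ws - 1) = some h := by
      rw [PySem.List.pyGet?_of_nonneg hashes hnn, hget]
    rw [hpy]
    apply ih (a + 1) (f init h) (by omega)
    have : (a + 1 + ws - 1).toNat = (a + ws - 1).toNat + 1 := by omega
    rw [this, ← List.drop_drop]
    rw [hdrop]
    rfl

-- A's scan fold accumulates exactly pvRecA.
theorem pvFoldA (t : List Int) : ∀ (m : Int) (acc : List Int),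
    (t.foldl (fun (st : Int × List Int) h => if h < st.1 then (h, st.2 ++ [h]) else st) (m, acc)).2
    = acc ++ pvRecA m t := by
  induction t with
  | nil => intro m acc; simp [pvRecA]
  | cons h t ih =>
    intro m acc
    by_cases hc : h < m
    · simp only [List.foldl_cons, if_pos hc, pvRecA, ih]
      simp
    · simp only [List.foldl_cons, if_neg hc, pvRecA, ih]

-- B's table fold accumulates exactly pvPm.
theorem pvFoldPm (t : List Int) : ∀ (c : Int) (acc : List Int),
    (t.foldl (fun (st : Int × List Int) h =>
        let cur := if st.1 < h then st.1 else h
        (cur, st.2 ++ [cur])) (c, acc)).2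
    = acc ++ pvPm c t := by
  induction t with
  | nil => intro c acc; simp [pvPm]
  | cons h t ih =>
    intro c acc
    simp only [List.foldl_cons, pvPm, ih]
    simp

-- B's collapse fold, started on a nonempty accumulator, is pvCl of the last element.
theorem pvFoldCl (p : List Int) : ∀ (out : List Int) (l : Int), out.getLast? = some l →
    p.foldl (fun out v => if out = [] ∨ out.getLast? ≠ some v then out ++ [v] else out) out
    = out ++ pvCl l p := by
  induction p with
  | nil => intro out l _; simp [pvCl]
  | cons v r ih =>
    intro out l hlast
    have hne : out ≠ [] := by intro h; rw [h] at hlast; simp at hlast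
    by_cases hv : v = l
    · have : ¬ (out = [] ∨ out.getLast? ≠ some v) := by
        push Not; exact ⟨hne, by rw [hlast, hv]⟩
      simp only [List.foldl_cons, if_neg this, pvCl, if_pos hv]
      exact ih out l hlast
    · have : (out = [] ∨ out.getLast? ≠ some v) := by
        right; rw [hlast]; simp [Ne.symm hv]
      simp only [List.foldl_cons, if_pos this, pvCl, if_neg hv]
      rw [ih (out ++ [v]) v (by simp)]
      simp
  
-- Core: collapsing the prefix-minimum table gives A's record sequence.
theorem pvCore (t : List Int) : ∀ (m : Int), pvCl m (pvPm m t) = pvRecA m t := by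
  induction t with
  | nil => intro m; simp [pvPm, pvRecA, pvCl]
  | cons h t ih =>
    intro m
    by_cases hc : h < m
    · have hm : ¬ m < h := by omega
      simp only [pvPm, if_neg hm, pvCl, pvRecA, if_pos hc]
      have : ¬ h = m := by omega
      rw [if_neg this, ih h]
    · have hc' : (if m < h then m else h) = m := by
        by_cases hm : m < h
        · simp [hm]
        · simp [hm]; omega
      simp only [pvPm, hc', pvCl, pvRecA, if_neg hc, ih m]
      simp

-- ===== VERDICT (by name: the statement is the Claim_ definition above) =====
theorem winnowing_spec : Claim_equal_winnowing := by
  intro hashes ws _hdom hpre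
  obtain ⟨hws, hne⟩ := hpre
  unfold Spec_winnowing winnowing winnowing_alt
  have hslice : PySem.List.slice hashes none (some ws) = hashes.take ws.toNat :=
    PySem.List.slice_to hashes (by omega)
  have hsne : PySem.List.slice hashes none (some ws) ≠ [] := by
    rw [hslice]
    cases hashes with
    | nil => exact absurd rfl hne
    | cons x xs =>
      simp [List.take_eq_nil_iff]
      omega
  cases hmin : PySem.List.min? (PySem.List.slice hashes none (some ws)) (fun y => y) with
  | none => exact absurd (PySem.List.min?_eq_none_iff _ _ |>.mp hmin) hsne
  | some m0 =>
    dsimp only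
    -- A's side: the indexed sliding fold is a fold over the dropped suffix, hence pvRecA
    rw [pvFoldIdx hashes ws
        (fun (st : Int × List Int) h => if h < st.1 then (h, st.2 ++ [h]) else st)
        hws (hashes.drop ws.toNat) 1 (m0, [m0]) le_rfl (by congr 1; omega)]
    rw [pvFoldA]
    -- B's side: hashes[window_size:] = drop, table fold = pvPm, collapse = pvCl
    rw [PySem.List.slice_from hashes (by omega : (0:Int) ≤ ws)]
    simp only [List.foldl_cons, lt_self_iff_false, if_false, List.nil_append]
    rw [pvFoldPm]
    simp only [List.singleton_append, List.foldl_cons]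
    rw [if_pos (Or.inl trivial), List.nil_append]
    rw [pvFoldCl _ [m0] m0 (by simp), pvCore]
    rfl
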